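-- pv_equiv track=rewrite | github.com/YaYoSantos/Trabalho_Integrador_6 | coleta/_ibge_http.py | expand_period_range
-- ===== SOURCE A (Python) =====
-- def expand_period_range(spec: str) -> str:
--     """Convert 'AAAASS-AAAASS' or 'AAAA-AAAA' range into comma list.
--
--     Trimestral (6-digit): '202001-202504' → '202001,202002,...,202504'
--     Anual (4-digit):      '2020-2024'     → '2020,2021,2022,2023,2024'
--     Already a list:       '2020,2021'     → unchanged
--     """
--     if "-" not in spec:
--         return spec
--
--     start, end = spec.split("-", 1)
--
--     if len(start) == 6:  # trimestral
--         ano_i, q_i = int(start[:4]), int(start[4:])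
--         ano_f, q_f = int(end[:4]), int(end[4:])
--         parts = []
--         ano, q = ano_i, q_i
--         while (ano, q) <= (ano_f, q_f):
--             parts.append(f"{ano}{q:02d}")
--             q += 1
--             if q > 4:
--                 q, ano = 1, ano + 1
--         return ",".join(parts)
--
--     # anual
--     return ",".join(str(a) for a in range(int(start), int(end) + 1))
-- ===== SOURCE B (Python) =====
-- def expand_period_range(spec: str) -> str:
--     if "-" not in spec:
--         return spec
--
--     start, end = spec.split("-", 1)
--
--     if len(start) == 6:  # trimestral: encode each period as idx = ano*4 + (q-1)
--         lo = int(start[:4]) * 4 + (int(start[4:]) - 1)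
--         hi = int(end[:4]) * 4 + (int(end[4:]) - 1)
--         return ",".join(f"{i // 4}{i % 4 + 1:02d}" for i in range(lo, hi + 1))
--
--     # anual
--     return ",".join(str(a) for a in range(int(start), int(end) + 1))
-- ===== Notes on version B (the rewrite author's own statement) =====
-- stated objective: simpler
-- what changed: The stateful carry/rollover while-loop over (year, quarter) pairs is replaced by an arithmetic encoding idx = year*4 + (quarter-1): one contiguous range(lo, hi+1) is mapped through divmod decoding, eliminating the mutable loop state and tuple comparison.
-- outside the precondition, e.g. on expand_period_range('202000-202001'): A returns '202000,202001', B returns '201904,202001'; on expand_period_range('202005-202101'): A returns '202005,202101', B returns '202101'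
import Mathlib
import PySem

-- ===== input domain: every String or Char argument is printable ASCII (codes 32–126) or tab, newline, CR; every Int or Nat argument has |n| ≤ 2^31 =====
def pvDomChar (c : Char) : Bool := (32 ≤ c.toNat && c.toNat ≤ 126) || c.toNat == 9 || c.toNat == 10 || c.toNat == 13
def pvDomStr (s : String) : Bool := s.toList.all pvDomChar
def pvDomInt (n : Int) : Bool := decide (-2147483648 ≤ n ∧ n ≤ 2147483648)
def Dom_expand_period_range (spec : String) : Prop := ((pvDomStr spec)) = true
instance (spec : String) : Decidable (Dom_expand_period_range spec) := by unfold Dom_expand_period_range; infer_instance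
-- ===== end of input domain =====

-- B replaces A's stateful carry/rollover loop by an arithmetic index range (simpler decomposition, same cost).

-- ===== PORT A =====
-- the while-loop of A, fuel-guarded (fuel is only a totality guard; within Pre_ it is always sufficient)
def pvATriLoop : Nat → Int → Int → Int → Int → List String
  | 0, _, _, _, _ => []
  | f + 1, ano, q, anoF, qF =>
    -- Python tuple comparison (ano, q) <= (anoF, qF)
    if ano < anoF ∨ (ano = anoF ∧ q ≤ qF) then
      -- f"{ano}{q:02d}"  (zero-padded to width 2 = zfill, exact also for negatives)
      (PySem.Int.toStr ano ++ PySem.Str.zfill (PySem.Int.toStr q) 2) ::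
        (if q + 1 > 4 then pvATriLoop f (ano + 1) 1 anoF qF
         else pvATriLoop f ano (q + 1) anoF qF)
    else []

def expand_period_range (spec : String) : String :=
  if PySem.Str.isIn "-" spec = false then spec
  else
    match PySem.Str.splitMax? spec "-" 1 with
    | some [start, end_] =>
      if PySem.Str.len start = 6 then
        match PySem.Int.ofStr? (PySem.Str.slice start none (some 4)),
              PySem.Int.ofStr? (PySem.Str.slice start (some 4) none),
              PySem.Int.ofStr? (PySem.Str.slice end_ none (some 4)),
              PySem.Int.ofStr? (PySem.Str.slice end_ (some 4) none) with
        | some anoI, some qI, some anoF, some qF =>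
          PySem.Str.join ","
            (pvATriLoop ((anoF - anoI).toNat * 4 + 9) anoI qI anoF qF)
        | _, _, _, _ => ""   -- int() raised (ValueError): outside Pre_
      else
        match PySem.Int.ofStr? start, PySem.Int.ofStr? end_ with
        | some s, some e =>
          PySem.Str.join "," ((PySem.List.pyRange s (e + 1) 1).map PySem.Int.toStr)
        | _, _ => ""         -- int() raised (ValueError): outside Pre_
    | _ => ""                -- unreachable: "-" ∈ spec gives exactly two pieces

-- ===== PORT B =====
def pvBDecode (i : Int) : String :=
  PySem.Int.toStr (PySem.Int.floordiv i 4) ++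
    PySem.Str.zfill (PySem.Int.toStr (PySem.Int.mod i 4 + 1)) 2

def expand_period_range_alt (spec : String) : String :=
  if PySem.Str.isIn "-" spec = false then spec
  else
    match PySem.Str.splitMax? spec "-" 1 with
    | none => ""
    | some parts =>
      match parts with
      | [] => ""
      | [_] => ""
      | _ :: _ :: _ :: _ => ""
      | [start, end_] =>
        if PySem.Str.len start = 6 then
          match PySem.Int.ofStr? (PySem.Str.slice start none (some 4)) with
          | some anoI =>
            match PySem.Int.ofStr? (PySem.Str.slice start (some 4) none) with
            | some qI =>
              match PySem.Int.ofStr? (PySem.Str.slice end_ none (some 4)) with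
              | some anoF =>
                match PySem.Int.ofStr? (PySem.Str.slice end_ (some 4) none) with
                | some qF =>
                  PySem.Str.join ","
                    ((PySem.List.pyRange (anoI * 4 + (qI - 1)) (anoF * 4 + (qF - 1) + 1) 1).map pvBDecode)
                | none => ""
              | none => ""
            | none => ""
          | none => ""   -- int() raised (ValueError): outside Pre_
        else
          match PySem.Int.ofStr? start with
          | some s =>
            match PySem.Int.ofStr? end_ with
            | some e =>
              PySem.Str.join "," ((PySem.List.pyRange s (e + 1) 1).map PySem.Int.toStr)
            | none => ""
          | none => ""

-- ===== PRECONDITION & SPEC =====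
-- Pre_ excludes inputs on which A's int() calls raise ValueError, and 6-digit range specs whose
-- quarter field lies outside 1..4 — malformed period specs on which A's literal emission of the
-- invalid quarter and B's normalised decoding are equally arbitrary.
def pvPreCheck (spec : String) : Bool :=
  if PySem.Str.isIn "-" spec = false then true
  else
    match PySem.Str.splitMax? spec "-" 1 with
    | none => false
    | some parts =>
      match parts with
      | [] => false
      | [_] => false
      | _ :: _ :: _ :: _ => false
      | [start, end_] =>
        if PySem.Str.len start = 6 then
          match PySem.Int.ofStr? (PySem.Str.slice start none (some 4)) with
          | none => false
          | some _ =>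
            match PySem.Int.ofStr? (PySem.Str.slice start (some 4) none) with
            | none => false
            | some qI =>
              match PySem.Int.ofStr? (PySem.Str.slice end_ none (some 4)) with
              | none => false
              | some _ =>
                match PySem.Int.ofStr? (PySem.Str.slice end_ (some 4) none) with
                | none => false
                | some qF => decide (1 ≤ qI ∧ qI ≤ 4 ∧ 1 ≤ qF ∧ qF ≤ 4)
        else ((PySem.Int.ofStr? start).isSome && (PySem.Int.ofStr? end_).isSome)

def Pre_expand_period_range (spec : String) : Prop := pvPreCheck spec = true
instance (spec : String) : Decidable (Pre_expand_period_range spec) := by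
  unfold Pre_expand_period_range; infer_instance

def pvWitness_expand_period_range : String := "202003-202102"

def Spec_expand_period_range (spec : String) (out : String) : Prop := out = expand_period_range_alt spec
instance (spec : String) (out : String) : Decidable (Spec_expand_period_range spec out) := by unfold Spec_expand_period_range; infer_instance

-- ===== CLAIM (what is proved, stated in full; the proofs are below) =====
def Claim_equal_expand_period_range : Prop := ∀ (spec : String), Dom_expand_period_range spec → Pre_expand_period_range spec → Spec_expand_period_range spec (expand_period_range spec)

-- ===== LEMMAS AND PROOFS =====

lemma pvFloordiv_four (a r : Int) (h0 : 0 ≤ r) (h3 : r < 4) :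
    PySem.Int.floordiv (a * 4 + r) 4 = a := by
  rw [PySem.Int.floordiv_eq_iff_of_pos (by omega)]
  omega

lemma pvMod_four (a r : Int) (h0 : 0 ≤ r) (h3 : r < 4) :
    PySem.Int.mod (a * 4 + r) 4 = r := by
  have h := PySem.Int.floordiv_mul_add_mod (a * 4 + r) 4
  rw [pvFloordiv_four a r h0 h3] at h
  omega

lemma pvBDecode_eq (ano q : Int) (h1 : 1 ≤ q) (h4 : q ≤ 4) :
    pvBDecode (ano * 4 + (q - 1)) =
      PySem.Int.toStr ano ++ PySem.Str.zfill (PySem.Int.toStr q) 2 := by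
  unfold pvBDecode
  rw [pvFloordiv_four ano (q - 1) (by omega) (by omega),
      pvMod_four ano (q - 1) (by omega) (by omega)]
  norm_num

lemma pvTri_eq (anoF qF : Int) (hqF : 1 ≤ qF ∧ qF ≤ 4) (f : Nat) :
    ∀ (ano q : Int), 1 ≤ q ∧ q ≤ 4 → (anoF * 4 + qF - (ano * 4 + q) + 1).toNat ≤ f →
      pvATriLoop f ano q anoF qF =
        (PySem.List.pyRange (ano * 4 + (q - 1)) (anoF * 4 + (qF - 1) + 1) 1).map pvBDecode := by
  induction f with
  | zero =>
    intro ano q hq hf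
    have hnil : PySem.List.pyRange (ano * 4 + (q - 1)) (anoF * 4 + (qF - 1) + 1) 1 = [] := by
      simp [PySem.List.pyRange]; omega
    rw [pvATriLoop, hnil, List.map_nil]
  | succ f ih =>
    intro ano q hq hf
    rw [pvATriLoop]
    by_cases hc : ano < anoF ∨ (ano = anoF ∧ q ≤ qF)
    · have hlt : ano * 4 + (q - 1) < anoF * 4 + (qF - 1) + 1 := by omega
      rw [if_pos hc, PySem.List.pyRange_one_cons hlt, List.map_cons,
          pvBDecode_eq ano q hq.1 hq.2]
      by_cases h4 : q + 1 > 4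
      · have hb : (1:Int) ≤ 1 ∧ (1:Int) ≤ 4 := by omega
        have hf' : (anoF * 4 + qF - ((ano + 1) * 4 + 1) + 1).toNat ≤ f := by omega
        have harg : (ano + 1) * 4 + (1 - 1 : Int) = ano * 4 + (q - 1) + 1 := by omega
        rw [if_pos h4, ih (ano + 1) 1 hb hf', harg]
      · have hb : 1 ≤ q + 1 ∧ q + 1 ≤ 4 := by omega
        have hf' : (anoF * 4 + qF - (ano * 4 + (q + 1)) + 1).toNat ≤ f := by omega
        have harg : ano * 4 + (q + 1 - 1) = ano * 4 + (q - 1) + 1 := by omega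
        rw [if_neg h4, ih ano (q + 1) hb hf', harg]
    · rw [if_neg hc]
      have hnil : PySem.List.pyRange (ano * 4 + (q - 1)) (anoF * 4 + (qF - 1) + 1) 1 = [] := by
        simp [PySem.List.pyRange]; omega
      rw [hnil, List.map_nil]

-- ===== VERDICT (by name: the statement is the Claim_ definition above) =====
theorem expand_period_range_spec : Claim_equal_expand_period_range := by
  intro spec _ hpre
  unfold Spec_expand_period_range expand_period_range expand_period_range_alt
  unfold Pre_expand_period_range pvPreCheck at hpre
  by_cases hin : PySem.Str.isIn "-" spec = false
  · rw [if_pos hin, if_pos hin]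
  · rw [if_neg hin, if_neg hin]
    rw [if_neg hin] at hpre
    cases hsplit : PySem.Str.splitMax? spec "-" 1 with
    | none => rfl
    | some parts =>
      match parts with
      | [] => rfl
      | [_] => rfl
      | _ :: _ :: _ :: _ => rfl
      | [start, end_] =>
        rw [hsplit] at hpre
        dsimp only at hpre ⊢
        by_cases hlen : PySem.Str.len start = 6
        · simp only [if_pos hlen] at hpre ⊢
          cases h1 : PySem.Int.ofStr? (PySem.Str.slice start none (some 4)) with
          | none => rw [h1] at hpre
          | some anoI =>
            cases h2 : PySem.Int.ofStr? (PySem.Str.slice start (some 4) none) with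
            | none => rw [h1, h2] at hpre
            | some qI =>
              cases h3 : PySem.Int.ofStr? (PySem.Str.slice end_ none (some 4)) with
              | none => rw [h1, h2, h3] at hpre
              | some anoF =>
                cases h4 : PySem.Int.ofStr? (PySem.Str.slice end_ (some 4) none) with
                | none => rw [h1, h2, h3, h4] at hpre
                | some qF =>
                  rw [h1, h2, h3, h4] at hpre
                  simp only [decide_eq_true_eq] at hpre
                  obtain ⟨hqi1, hqi4, hqf1, hqf4⟩ := hpre
                  dsimp only
                  rw [pvTri_eq anoF qF ⟨hqf1, hqf4⟩ _ anoI qI ⟨hqi1, hqi4⟩ (by omega)]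
        · simp only [if_neg hlen] at hpre ⊢
          cases h1 : PySem.Int.ofStr? start with
          | none => rw [h1] at hpre
          | some s =>
            cases h2 : PySem.Int.ofStr? end_ with
            | none => rw [h1, h2] at hpre
            | some e => rfl
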